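-- pv_equiv track=rewrite | github.com/Gabrie50/bot-bacbo | main.py | _calcular_streak
-- ===== SOURCE A (Python) =====
-- def _calcular_streak(resultados):
--     if not resultados:
--         return 0
--     streak = 1
--     for i in range(1, len(resultados)):
--         if resultados[-i] == resultados[-(i+1)]:
--             streak += 1
--         else:
--             break
--     return streak
-- ===== SOURCE B (Python) =====
-- def _calcular_streak(resultados):
--     streak = 0
--     for i in range(len(resultados)):
--         if i == 0 or resultados[i] != resultados[i - 1]:
--             streak = 1
--         else:
--             streak += 1
--     return streak
-- ===== Notes on version B (the rewrite author's own statement) =====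
-- stated objective: alternative
-- what changed: Replaces the backward scan from the end with early break by a single forward pass keeping a running run-length counter that resets on each adjacent mismatch; the counter after the full scan is the trailing-run length.
import Mathlib
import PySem

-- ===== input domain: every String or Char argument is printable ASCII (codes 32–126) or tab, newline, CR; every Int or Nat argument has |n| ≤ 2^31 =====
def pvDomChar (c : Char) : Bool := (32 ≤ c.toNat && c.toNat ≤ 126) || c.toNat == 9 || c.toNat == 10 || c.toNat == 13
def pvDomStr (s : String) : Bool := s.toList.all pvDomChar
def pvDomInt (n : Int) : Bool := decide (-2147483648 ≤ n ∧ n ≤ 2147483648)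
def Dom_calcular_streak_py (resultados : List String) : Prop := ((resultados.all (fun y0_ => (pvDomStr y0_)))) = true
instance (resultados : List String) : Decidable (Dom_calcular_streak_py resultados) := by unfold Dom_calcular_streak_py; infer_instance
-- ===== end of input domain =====

-- B replaces A's backward scan-with-break from the end by a single forward pass with a
-- running run-length counter (alternative decomposition; same exact return value).

-- ===== PORT A =====
-- the 'for i in range(1, len(resultados))' loop with its break: recursion over the range list;
-- 'resultados[-i] == resultados[-(i+1)]' via pyGet? (indices are always in range here, so exact)
def pvALoop (xs : List String) (streak : Int) : List Int → Int
  | [] => streak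
  | i :: rest =>
      if PySem.List.pyGet? xs (-i) = PySem.List.pyGet? xs (-(i + 1)) then
        pvALoop xs (streak + 1) rest
      else streak

def calcular_streak_py (resultados : List String) : Int :=
  if resultados = [] then 0
  else pvALoop resultados 1 (PySem.List.pyRange 1 (resultados.length : Int) 1)

-- ===== PORT B =====
def calcular_streak_py_alt (resultados : List String) : Int :=
  (PySem.List.pyRange 0 (resultados.length : Int) 1).foldl
    (fun streak i =>
      if i = 0 ∨ PySem.List.pyGet? resultados i ≠ PySem.List.pyGet? resultados (i - 1) then 1
      else streak + 1) 0

-- ===== PRECONDITION & SPEC =====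
def Spec_calcular_streak_py (resultados : List String) (out : Int) : Prop := out = calcular_streak_py_alt resultados
instance (resultados : List String) (out : Int) : Decidable (Spec_calcular_streak_py resultados out) := by unfold Spec_calcular_streak_py; infer_instance

-- ===== CLAIM (what is proved, stated in full; the proofs are below) =====
def Claim_equal_calcular_streak_py : Prop := ∀ (resultados : List String), Dom_calcular_streak_py resultados → Spec_calcular_streak_py resultados (calcular_streak_py resultados)

-- ===== LEMMAS AND PROOFS =====

-- negative indices of xs ++ [a] beyond the last element are those of xs, shifted by one
lemma pyGet_neg_shift (xs : List String) (a : String) (i : Int) (hi : 1 ≤ i) :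
    PySem.List.pyGet? (xs ++ [a]) (-(i + 1)) = PySem.List.pyGet? xs (-i) := by
  simp only [PySem.List.pyGet?, PySem.List.pyIdx?, List.length_append, List.length_singleton]
  split_ifs with h1 h2 h3 h4 h5 h6 h7 <;> try omega
  all_goals simp_all
  · have he : xs.length + 1 - (i + 1).toNat = xs.length - i.toNat := by omega
    rw [he]
    exact List.getElem?_append_left (by omega)

-- the accumulator of A's loop is additive
lemma pvALoop_succ (xs : List String) (L : List Int) :
    ∀ s : Int, pvALoop xs (s + 1) L = pvALoop xs s L + 1 := by
  induction L with
  | nil => intro s; simp [pvALoop]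
  | cons i rest ih =>
      intro s
      simp only [pvALoop]
      split_ifs with h
      · exact ih (s + 1)
      · rfl

-- running A's loop on xs ++ [a] with all indices shifted by one is running it on xs
lemma pvALoop_shift (xs : List String) (a : String) (L : List Int)
    (hL : ∀ i ∈ L, 1 ≤ i) :
    ∀ s : Int, pvALoop (xs ++ [a]) s (L.map (fun i => i + 1)) = pvALoop xs s L := by
  induction L with
  | nil => intro s; simp [pvALoop]
  | cons i rest ih =>
      intro s
      have hi : 1 ≤ i := hL i (by simp)
      have h1 := pyGet_neg_shift xs a i hi
      have h2 := pyGet_neg_shift xs a (i + 1) (by omega)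
      simp only [List.map_cons, pvALoop]
      rw [h1]
      rw [show -(i + 1 + 1) = -((i + 1) + 1) by ring, h2]
      split_ifs with h
      · exact ih (fun j hj => hL j (by simp [hj])) (s + 1)
      · rfl

-- a shifted range is the range of shifted elements
lemma pyRange_shift (k n : Int) :
    PySem.List.pyRange (k + 1) (n + 1) 1 = (PySem.List.pyRange k n 1).map (fun i => i + 1) := by
  simp [PySem.List.pyRange_one, List.map_map]
  intro j _
  omega

-- A satisfies the snoc recursion
lemma A_snoc (xs : List String) (a : String) :
    calcular_streak_py (xs ++ [a]) =
      if xs.getLast? = some a then calcular_streak_py xs + 1 else 1 := by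
  rcases eq_or_ne xs [] with h | h
  · subst h; simp [calcular_streak_py]; rfl
  · have hn : 1 ≤ xs.length := List.length_pos_of_ne_nil h
    rw [calcular_streak_py, if_neg (by simp)]
    have hlen : ((xs ++ [a]).length : Int) = (xs.length : Int) + 1 := by simp
    rw [hlen, PySem.List.pyRange_one_cons (by exact_mod_cast Nat.lt_succ_of_le hn)]
    rw [pvALoop]
    rw [show ((1:Int)+1) = 2 from rfl]
    rw [show (-(1:Int)) = -1 from rfl]
    rw [PySem.List.pyGet?_neg_one_append_singleton]
    have h2 : PySem.List.pyGet? (xs ++ [a]) (-2) = xs.getLast? := by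
      have := pyGet_neg_shift xs a 1 le_rfl
      simpa using this.trans (PySem.List.pyGet?_neg_one xs)
    rw [h2]
    obtain ⟨b, hb⟩ := Option.isSome_iff_exists.mp (List.getLast?_isSome.mpr h)
    rw [hb]
    by_cases hab : a = b
    · subst hab
      rw [if_pos rfl, if_pos rfl]
      rw [show ((2:Int)) = 1 + 1 from rfl, pyRange_shift, pvALoop_shift xs a _
        (fun i hi => (PySem.List.mem_pyRange_one.mp hi).1), pvALoop_succ]
      rw [calcular_streak_py, if_neg h]
    · rw [if_neg (by simpa using hab), if_neg (by simpa using fun e => hab e.symm)]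

-- positive in-range indices of xs ++ ys are those of xs
lemma pyGet_append_left (xs ys : List String) (i : Int) (h0 : 0 ≤ i) (h1 : i < xs.length) :
    PySem.List.pyGet? (xs ++ ys) i = PySem.List.pyGet? xs i := by
  rw [PySem.List.pyGet?_of_nonneg _ h0, PySem.List.pyGet?_of_nonneg _ h0]
  exact List.getElem?_append_left (by omega)

-- B satisfies the same snoc recursion
lemma B_snoc (xs : List String) (a : String) :
    calcular_streak_py_alt (xs ++ [a]) =
      if xs.getLast? = some a then calcular_streak_py_alt xs + 1 else 1 := by
  rcases eq_or_ne xs [] with h | h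
  · subst h; simp [calcular_streak_py_alt]; rfl
  · have hn : 1 ≤ xs.length := List.length_pos_of_ne_nil h
    rw [calcular_streak_py_alt]
    have hlen : ((xs ++ [a]).length : Int) = (xs.length : Int) + 1 := by simp
    rw [hlen, PySem.List.pyRange_one_succ_right (by positivity), List.foldl_append]
    have hcongr : (PySem.List.pyRange 0 (xs.length : Int) 1).foldl
        (fun streak i =>
          if i = 0 ∨ PySem.List.pyGet? (xs ++ [a]) i ≠ PySem.List.pyGet? (xs ++ [a]) (i - 1) then 1
          else streak + 1) 0 = calcular_streak_py_alt xs := by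
      rw [calcular_streak_py_alt]
      apply PySem.List.foldl_congr_mem
      intro acc i hi
      obtain ⟨h0, h1⟩ := PySem.List.mem_pyRange_one.mp hi
      rcases eq_or_ne i 0 with rfl | hne
      · simp
      · rw [pyGet_append_left xs [a] i h0 (by exact_mod_cast h1),
            pyGet_append_left xs [a] (i - 1) (by omega) (by omega)]
    rw [hcongr]
    have hgn : PySem.List.pyGet? (xs ++ [a]) (xs.length : Int) = some a := by
      simp
    have hgp : PySem.List.pyGet? (xs ++ [a]) ((xs.length : Int) - 1) = xs.getLast? := by
      rw [pyGet_append_left xs [a] _ (by omega) (by omega),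
          PySem.List.pyGet?_of_nonneg _ (by omega), List.getLast?_eq_getElem?]
      congr 1
      omega
    simp only [List.foldl_cons, List.foldl_nil]
    rw [hgn, hgp]
    obtain ⟨b, hb⟩ := Option.isSome_iff_exists.mp (List.getLast?_isSome.mpr h)
    rw [hb]
    by_cases hab : a = b
    · subst hab
      rw [if_neg (by simp; omega), if_pos rfl]
    · rw [if_pos (by right; simpa using hab), if_neg (by simpa using fun e => hab e.symm)]

-- ===== VERDICT (by name: the statement is the Claim_ definition above) =====
-- A = B unconditionally, by induction on snoc
lemma AeqB (xs : List String) : calcular_streak_py xs = calcular_streak_py_alt xs := by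
  induction xs using List.reverseRecOn with
  | nil => rfl
  | append_singleton ys a ih => rw [A_snoc, B_snoc, ih]

theorem calcular_streak_py_spec : Claim_equal_calcular_streak_py := by
  intro resultados _
  exact AeqB resultados
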